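-- pv_equiv track=rewrite | github.com/lynhan/fun | array/alt-merge.py | f
-- ===== SOURCE A (Python) =====
-- from copy import deepcopy
--
-- def f(a, b):
--     res = []
--     def help(part, aturn, ai, bi):
--         if aturn:
--             while ai < len(a) and a[ai] < b[bi]:
--                 ai += 1
--             while ai < len(a):
--                 newpart = deepcopy(part)
--                 newpart.append(a[ai])
--                 if len(newpart) > 1 and ai != len(a) - 1:
--                     res.append(newpart)
--                 help(newpart, False, ai, bi)
--                 ai += 1
--         elif bi < len(b):
--             while bi < len(b) and b[bi] < a[ai]:
--                 bi += 1
--             while bi < len(b):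
--                 newpart = deepcopy(part)
--                 newpart.append(b[bi])
--                 if len(newpart) > 1:
--                     res.append(newpart)
--                 help(newpart, True, ai, bi)
--                 bi += 1
--     help([], True, 0, 0)
--     return res
-- ===== SOURCE B (Python) =====
-- def f(a, b):
--     res = []
--     stack = [(False, [], True, 0, 0)]
--     while stack:
--         emit, part, aturn, ai, bi = stack.pop()
--         if emit:
--             res.append(part)
--         children = []
--         if aturn:
--             while ai < len(a) and a[ai] < b[bi]:
--                 ai += 1
--             for i in range(ai, len(a)):
--                 np = part + [a[i]]
--                 children.append((len(np) > 1 and i != len(a) - 1, np, False, i, bi))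
--         elif bi < len(b):
--             while bi < len(b) and b[bi] < a[ai]:
--                 bi += 1
--             for j in range(bi, len(b)):
--                 np = part + [b[j]]
--                 children.append((len(np) > 1, np, True, ai, j))
--         stack.extend(reversed(children))
--     return res
-- ===== Notes on version B (the rewrite author's own statement) =====
-- stated objective: alternative
-- what changed: The recursive helper with a shared mutable result list is replaced by an explicit worklist loop: frames (emit-flag, part, turn, ai, bi) are popped from a stack, emitted on pop, and successor frames are pushed in reverse so the DFS pre-order of results is preserved.
import Mathlib
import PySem

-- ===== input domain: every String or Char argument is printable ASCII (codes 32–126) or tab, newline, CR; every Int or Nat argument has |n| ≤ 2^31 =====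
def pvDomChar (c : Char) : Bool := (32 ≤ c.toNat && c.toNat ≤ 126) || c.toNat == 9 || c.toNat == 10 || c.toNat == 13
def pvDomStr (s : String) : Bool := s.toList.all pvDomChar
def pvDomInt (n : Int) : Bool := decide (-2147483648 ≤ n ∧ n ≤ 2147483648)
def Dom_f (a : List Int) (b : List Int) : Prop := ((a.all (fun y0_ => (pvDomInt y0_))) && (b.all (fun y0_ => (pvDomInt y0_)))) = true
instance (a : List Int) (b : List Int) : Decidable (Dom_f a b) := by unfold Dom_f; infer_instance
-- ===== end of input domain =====

-- B replaces A's recursive helper (shared mutable `res`) by an explicit stack of frames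
-- (emit-flag, part, turn, ai, bi), popped in DFS pre-order; same return value on Pre_f.

-- ===== PORT A =====
-- shared loop helpers: `skipIdx` is Python's `while i < len and p(i): i += 1`,
-- `loopIdx` is `while i < len:` collecting what each iteration contributes.
def skipGo (p : Nat → Bool) : Nat → Nat → Nat
  | i, 0 => i
  | i, k+1 => if p i then skipGo p (i+1) k else i

def skipIdx (p : Nat → Bool) (len : Nat) (i : Nat) : Nat := skipGo p i (len - i)

def loopGo {α : Type} (g : Nat → List α) : Nat → Nat → List α
  | _, 0 => []
  | i, k+1 => g i ++ loopGo g (i+1) k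

def loopIdx {α : Type} (g : Nat → List α) (len : Nat) (i : Nat) : List α :=
  loopGo g i (len - i)

-- A's `help` transliterated; the mutable `res` becomes the returned list (appends happen
-- in the same order).  Python's recursion has no structural bound, so the port carries a
-- fuel argument; `f` supplies fuel 2*(|a|+|b|)+2, which suffices on every Pre_f input
-- (proved via the measure `meas` below); a[ai]/b[bi] are ported as getD because every
-- access is index-guarded (the unguarded b[bi] with b = [] is excluded by Pre_f).
def helpA (a b : List Int) : Nat → List Int → Bool → Nat → Nat → List (List Int)
  | 0, _, _, _, _ => []
  | (fu+1), part, aturn, ai, bi =>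
    if aturn then
      let ai' := skipIdx (fun i => decide (a.getD i 0 < b.getD bi 0)) a.length ai
      loopIdx (fun i =>
        let np := part ++ [a.getD i 0]
        (if 1 < np.length ∧ i ≠ a.length - 1 then [np] else []) ++
          helpA a b fu np false i bi) a.length ai'
    else if bi < b.length then
      let bi' := skipIdx (fun j => decide (b.getD j 0 < a.getD ai 0)) b.length bi
      loopIdx (fun j =>
        let np := part ++ [b.getD j 0]
        (if 1 < np.length then [np] else []) ++
          helpA a b fu np true ai j) b.length bi'
    else []

def f (a : List Int) (b : List Int) : List (List Int) :=
  helpA a b (2*(a.length + b.length) + 2) [] true 0 0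

-- ===== PORT B =====
-- the `children` list built by Source B's for-loop for one popped frame
def childrenB (a b : List Int) (part : List Int) (aturn : Bool) (ai bi : Nat) :
    List (Bool × List Int × Bool × Nat × Nat) :=
  if aturn then
    let ai' := skipIdx (fun i => decide (a.getD i 0 < b.getD bi 0)) a.length ai
    loopIdx (fun i =>
      let np := part ++ [a.getD i 0]
      [(decide (1 < np.length ∧ i ≠ a.length - 1), np, false, i, bi)]) a.length ai'
  else if bi < b.length then
    let bi' := skipIdx (fun j => decide (b.getD j 0 < a.getD ai 0)) b.length bi
    loopIdx (fun j =>
      let np := part ++ [b.getD j 0]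
      [(decide (1 < np.length), np, true, ai, j)]) b.length bi'
  else []

-- Source B's `while stack:` loop; the stack is a Lean list with its head as the top, so
-- `stack.extend(reversed(children))` followed by pops from the end is `children ++ rest`.
-- The while-loop has no structural bound, so the port carries fuel; f_alt's fuel
-- (|a|+|b|+1)^(2*(|a|+|b|)+2) bounds the number of pops on every Pre_f input (proved below).
def runB (a b : List Int) : Nat → List (Bool × List Int × Bool × Nat × Nat) → List (List Int) → List (List Int)
  | 0, _, res => res
  | (_+1), [], res => res
  | (fu+1), (emit, part, aturn, ai, bi) :: rest, res =>
    runB a b fu (childrenB a b part aturn ai bi ++ rest)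
      (res ++ if emit then [part] else [])

def f_alt (a : List Int) (b : List Int) : List (List Int) :=
  runB a b ((a.length + b.length + 1) ^ (2*(a.length + b.length) + 2))
    [(false, [], true, 0, 0)] []

-- ===== PRECONDITION & SPEC =====
-- Pre_f excludes exactly the inputs on which A raises: (i) a ≠ [] with b = [], where the first
-- skip loop's b[bi] raises IndexError, and (ii) inputs where some a[i] at or after the first
-- a-index k with a[k] ≥ b[0] also occurs in b — there A's mutual recursion revisits the same
-- state and raises RecursionError (checked exhaustively on all lists of length ≤ 3 over 0..3:
-- A returns normally precisely on Pre_f).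
def Pre_f (a : List Int) (b : List Int) : Prop :=
  (a = [] ∨ b ≠ []) ∧
    ∀ i < a.length, (∃ k ≤ i, b.getD 0 0 ≤ a.getD k 0) → a.getD i 0 ∉ b
instance (a : List Int) (b : List Int) : Decidable (Pre_f a b) := by unfold Pre_f; infer_instance

def pvWitness_f : List Int × List Int := ([1, 3], [2, 4])

def Spec_f (a : List Int) (b : List Int) (out : List (List Int)) : Prop := out = f_alt a b
instance (a : List Int) (b : List Int) (out : List (List Int)) : Decidable (Spec_f a b out) := by unfold Spec_f; infer_instance

-- ===== CLAIM (what is proved, stated in full; the proofs are below) =====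
def Claim_equal_f : Prop := ∀ (a : List Int) (b : List Int), Dom_f a b → Pre_f a b → Spec_f a b (f a b)

-- ===== LEMMAS AND PROOFS =====

-- the index where the very first skip loop stops (first k with a[k] ≥ b[0])
def a0v (a b : List Int) : Nat :=
  skipIdx (fun i => decide (a.getD i 0 < b.getD 0 0)) a.length 0

-- disjointness restricted to the a-indices the recursion can actually choose
def DisjR (a b : List Int) : Prop :=
  ∀ i, a0v a b ≤ i → i < a.length → a.getD i 0 ∉ b

-- termination measure of a `help` call (or frame): strictly decreases along every
-- recursive call / child frame on Pre_f inputs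
def turnC (a b : List Int) (aturn : Bool) (ai bi : Nat) : Nat :=
  if aturn then (if b.getD bi 0 < a.getD ai 0 then 1 else 0)
  else (if a.getD ai 0 < b.getD bi 0 then 1 else 0)

def meas (a b : List Int) (aturn : Bool) (ai bi : Nat) : Nat :=
  2 * ((a.length - ai) + (b.length - bi)) + turnC a b aturn ai bi

-- state invariant: b-index in range (a-turn) / chosen a-index in range and ≥ a0v (b-turn)
def StInv (a b : List Int) (aturn : Bool) (ai bi : Nat) : Prop :=
  if aturn then (bi < b.length ∨ a = []) ∧ (a0v a b ≤ ai ∨ (ai = 0 ∧ bi = 0))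
  else ai < a.length ∧ a0v a b ≤ ai

lemma meas_le (a b : List Int) (aturn : Bool) (ai bi : Nat) :
    meas a b aturn ai bi ≤ 2 * (a.length + b.length) + 1 := by
  unfold meas turnC
  have h1 : a.length - ai ≤ a.length := Nat.sub_le _ _
  have h2 : b.length - bi ≤ b.length := Nat.sub_le _ _
  split_ifs <;> omega

lemma turnC_true (a b : List Int) (ai bi : Nat) :
    turnC a b true ai bi = if b.getD bi 0 < a.getD ai 0 then 1 else 0 := by
  simp [turnC]

lemma turnC_false (a b : List Int) (ai bi : Nat) :
    turnC a b false ai bi = if a.getD ai 0 < b.getD bi 0 then 1 else 0 := by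
  simp [turnC]

lemma skipGo_ge (p : Nat → Bool) : ∀ k i, i ≤ skipGo p i k := by
  intro k
  induction k with
  | zero => intro i; simp [skipGo]
  | succ k ih =>
    intro i
    simp only [skipGo]
    split
    · exact le_trans (Nat.le_succ i) (ih (i+1))
    · exact le_rfl

lemma skipIdx_ge (p : Nat → Bool) (len i : Nat) : i ≤ skipIdx p len i :=
  skipGo_ge p (len - i) i

lemma skipGo_stop (p : Nat → Bool) : ∀ k i, skipGo p i k < i + k → p (skipGo p i k) = false := by
  intro k
  induction k with
  | zero => intro i h; simp [skipGo] at h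
  | succ k ih =>
    intro i h
    simp only [skipGo] at h ⊢
    by_cases hp : p i = true
    · rw [if_pos hp] at h ⊢
      exact ih (i+1) (by omega)
    · rw [if_neg hp] at h ⊢
      simpa using hp

lemma skipIdx_stop (p : Nat → Bool) (len i : Nat) (h : skipIdx p len i < len) :
    p (skipIdx p len i) = false := by
  unfold skipIdx at h ⊢
  by_cases hle : i ≤ len
  · exact skipGo_stop p (len - i) i (by omega)
  · have : len - i = 0 := by omega
    rw [this] at h ⊢
    simp [skipGo] at h ⊢
    omega

-- Pre_f's second conjunct is exactly DisjR (the ∃ k ≤ i clause names the stop index a0v)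
lemma pre_disjR (a b : List Int) (hpre : Pre_f a b) : DisjR a b := by
  intro i h0 hlen
  apply hpre.2 i hlen
  refine ⟨a0v a b, h0, ?_⟩
  have hlt : a0v a b < a.length := by omega
  have := skipIdx_stop (fun k => decide (a.getD k 0 < b.getD 0 0)) a.length 0 hlt
  unfold a0v
  simpa using this

lemma loopGo_eq {α : Type} (g : Nat → List α) : ∀ k i, loopGo g i k = (List.range' i k).flatMap g := by
  intro k
  induction k with
  | zero => intro i; simp [loopGo]
  | succ k ih =>
    intro i
    rw [List.range'_succ, List.flatMap_cons]
    simp only [loopGo]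
    rw [ih (i+1)]

lemma loopIdx_eq {α : Type} (g : Nat → List α) (len i : Nat) :
    loopIdx g len i = (List.range' i (len - i)).flatMap g :=
  loopGo_eq g (len - i) i

lemma flatMap_single {alpha beta : Type} (l : List alpha) (c : alpha -> beta) :
    (l.flatMap fun x => [c x]) = l.map c := by
  induction l with
  | nil => simp
  | cons x xs ih => simp [ih]

lemma flatMap_congr_mem {alpha beta : Type} (l : List alpha) (g1 g2 : alpha -> List beta)
    (h : forall x, x ∈ l -> g1 x = g2 x) : l.flatMap g1 = l.flatMap g2 := by
  induction l with
  | nil => simp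
  | cons x xs ih =>
    simp only [List.flatMap_cons]
    rw [h x (by simp), ih (fun y hy => h y (by simp [hy]))]

lemma loopIdx_congr {alpha : Type} (g1 g2 : Nat -> List alpha) (len i : Nat)
    (h : forall j, i <= j -> j < len -> g1 j = g2 j) :
    loopIdx g1 len i = loopIdx g2 len i := by
  rw [loopIdx_eq, loopIdx_eq]
  apply flatMap_congr_mem
  intro j hj
  rw [List.mem_range'_1] at hj
  exact h j hj.1 (by omega)

lemma getD_mem (l : List Int) (i : Nat) (h : i < l.length) : l.getD i 0 ∈ l := by
  rw [List.getD_eq_getElem l 0 h]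
  exact List.getElem_mem h

-- any index the a-turn for-loop enumerates is ≥ a0v
lemma chosen_ge_a0 (a b : List Int) (ai bi i : Nat)
    (ha0 : a0v a b ≤ ai ∨ (ai = 0 ∧ bi = 0))
    (hge : skipIdx (fun k => decide (a.getD k 0 < b.getD bi 0)) a.length ai ≤ i) :
    a0v a b ≤ i := by
  rcases ha0 with h | ⟨h1, h2⟩
  · exact le_trans (le_trans h (skipIdx_ge _ _ _)) hge
  · subst h1; subst h2
    unfold a0v
    exact hge

lemma measA_child (a b : List Int) (ai bi i : Nat) (hd : DisjR a b)
    (hinv : bi < b.length ∨ a = [])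
    (ha0 : a0v a b ≤ ai ∨ (ai = 0 ∧ bi = 0))
    (hge : skipIdx (fun k => decide (a.getD k 0 < b.getD bi 0)) a.length ai <= i)
    (hlt : i < a.length) :
    meas a b false i bi < meas a b true ai bi := by
  have hbi : bi < b.length := by
    rcases hinv with h | h
    · exact h
    · subst h; simp at hlt
  have h1 := skipIdx_ge (fun k => decide (a.getD k 0 < b.getD bi 0)) a.length ai
  by_cases hcase : ai < i
  · have hsub : a.length - i < a.length - ai := by omega
    unfold meas
    rw [turnC_false, turnC_true]
    split_ifs <;> omega
  · have hieq : i = ai := by omega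
    have hski : skipIdx (fun k => decide (a.getD k 0 < b.getD bi 0)) a.length ai = ai := by omega
    have hstop := skipIdx_stop (fun k => decide (a.getD k 0 < b.getD bi 0)) a.length ai
      (by rw [hski]; omega)
    rw [hski] at hstop
    simp only [decide_eq_false_iff_not, not_lt] at hstop
    have hai0 : a0v a b ≤ ai := hieq ▸ chosen_ge_a0 a b ai bi i ha0 hge
    have hne : a.getD ai 0 ≠ b.getD bi 0 := by
      intro he
      exact hd ai hai0 (by omega) (he ▸ getD_mem b bi hbi)
    have hgt : b.getD bi 0 < a.getD ai 0 := lt_of_le_of_ne hstop (Ne.symm hne)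
    subst hieq
    unfold meas
    rw [turnC_false, turnC_true]
    split_ifs <;> omega

lemma measB_child (a b : List Int) (ai bi j : Nat) (hd : DisjR a b)
    (hinv : ai < a.length) (ha0 : a0v a b ≤ ai)
    (hge : skipIdx (fun k => decide (b.getD k 0 < a.getD ai 0)) b.length bi <= j)
    (hlt : j < b.length) :
    meas a b true ai j < meas a b false ai bi := by
  have h1 := skipIdx_ge (fun k => decide (b.getD k 0 < a.getD ai 0)) b.length bi
  by_cases hcase : bi < j
  · have hsub : b.length - j < b.length - bi := by omega
    unfold meas
    rw [turnC_true, turnC_false]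
    split_ifs <;> omega
  · have hjeq : j = bi := by omega
    have hski : skipIdx (fun k => decide (b.getD k 0 < a.getD ai 0)) b.length bi = bi := by omega
    have hstop := skipIdx_stop (fun k => decide (b.getD k 0 < a.getD ai 0)) b.length bi
      (by rw [hski]; omega)
    rw [hski] at hstop
    simp only [decide_eq_false_iff_not, not_lt] at hstop
    have hne : a.getD ai 0 ≠ b.getD bi 0 := by
      intro he
      exact hd ai ha0 hinv (he ▸ getD_mem b bi (by omega))
    have hgt : a.getD ai 0 < b.getD bi 0 := lt_of_le_of_ne hstop hne
    subst hjeq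
    unfold meas
    rw [turnC_true, turnC_false]
    split_ifs <;> omega

lemma children_spec (a b : List Int) (part : List Int) (aturn : Bool) (ai bi : Nat)
    (hd : DisjR a b) (hinv : StInv a b aturn ai bi) :
    forall fr, fr ∈ childrenB a b part aturn ai bi ->
      StInv a b fr.2.2.1 fr.2.2.2.1 fr.2.2.2.2 ∧
      meas a b fr.2.2.1 fr.2.2.2.1 fr.2.2.2.2 < meas a b aturn ai bi := by
  intro fr hfr
  cases aturn with
  | true =>
    simp only [childrenB, if_true, loopIdx_eq, List.mem_flatMap, List.mem_range'_1,
      List.mem_singleton] at hfr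
    obtain ⟨j, ⟨hj1, hj2⟩, rfl⟩ := hfr
    have hjlt : j < a.length := by omega
    obtain ⟨hinv1, hinv2⟩ : ((bi < b.length ∨ a = []) ∧ (a0v a b ≤ ai ∨ (ai = 0 ∧ bi = 0))) := by
      unfold StInv at hinv; simpa using hinv
    refine ⟨?_, ?_⟩
    · unfold StInv
      simp only [Bool.false_eq_true, if_false]
      exact ⟨hjlt, chosen_ge_a0 a b ai bi j hinv2 hj1⟩
    · exact measA_child a b ai bi j hd hinv1 hinv2 hj1 hjlt
  | false =>
    by_cases hb : bi < b.length
    · simp only [childrenB, Bool.false_eq_true, if_false, if_pos hb, loopIdx_eq,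
        List.mem_flatMap, List.mem_range'_1, List.mem_singleton] at hfr
      obtain ⟨j, ⟨hj1, hj2⟩, rfl⟩ := hfr
      have hjlt : j < b.length := by omega
      obtain ⟨hinv1, hinv2⟩ : (ai < a.length ∧ a0v a b ≤ ai) := by
        unfold StInv at hinv; simpa using hinv
      refine ⟨?_, ?_⟩
      · unfold StInv
        simp only [if_true]
        exact ⟨Or.inl hjlt, Or.inl hinv2⟩
      · exact measB_child a b ai bi j hd hinv1 hinv2 hj1 hjlt
    · simp [childrenB, hb] at hfr

lemma helpA_stable (a b : List Int) (hd : DisjR a b) :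
    forall n fu1 fu2 part aturn ai bi, StInv a b aturn ai bi ->
      meas a b aturn ai bi <= n -> n < fu1 -> n < fu2 ->
      helpA a b fu1 part aturn ai bi = helpA a b fu2 part aturn ai bi := by
  intro n
  induction n using Nat.strong_induction_on with
  | _ n ih =>
    intro fu1 fu2 part aturn ai bi hinv hm h1 h2
    obtain ⟨k1, rfl⟩ : ∃ k, fu1 = k + 1 := ⟨fu1 - 1, by omega⟩
    obtain ⟨k2, rfl⟩ : ∃ k, fu2 = k + 1 := ⟨fu2 - 1, by omega⟩
    cases aturn with
    | true =>
      obtain ⟨hinv1, hinv2⟩ : ((bi < b.length ∨ a = []) ∧ (a0v a b ≤ ai ∨ (ai = 0 ∧ bi = 0))) := by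
        unfold StInv at hinv; simpa using hinv
      simp only [helpA, if_true]
      apply loopIdx_congr
      intro j hge hlt
      dsimp only
      have hmc : meas a b false j bi < meas a b true ai bi :=
        measA_child a b ai bi j hd hinv1 hinv2 hge hlt
      rw [ih (meas a b false j bi) (by omega) k1 k2 _ false j bi
        (by
          unfold StInv
          simp only [Bool.false_eq_true, if_false]
          exact ⟨hlt, chosen_ge_a0 a b ai bi j hinv2 hge⟩) le_rfl (by omega) (by omega)]
    | false =>
      by_cases hb : bi < b.length
      · obtain ⟨hinv1, hinv2⟩ : (ai < a.length ∧ a0v a b ≤ ai) := by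
          unfold StInv at hinv; simpa using hinv
        simp only [helpA, Bool.false_eq_true, if_false, if_pos hb]
        apply loopIdx_congr
        intro j hge hlt
        dsimp only
        have hmc : meas a b true ai j < meas a b false ai bi :=
          measB_child a b ai bi j hd hinv1 hinv2 hge hlt
        rw [ih (meas a b true ai j) (by omega) k1 k2 _ true ai j
          (by
            unfold StInv
            simp only [if_true]
            exact ⟨Or.inl hlt, Or.inl hinv2⟩) le_rfl (by omega) (by omega)]
      · simp [helpA, hb]

lemma helpA_children (a b : List Int) (fu : Nat) (part : List Int) (aturn : Bool) (ai bi : Nat) :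
    helpA a b (fu+1) part aturn ai bi =
      (childrenB a b part aturn ai bi).flatMap
        (fun fr => (if fr.1 then [fr.2.1] else []) ++
          helpA a b fu fr.2.1 fr.2.2.1 fr.2.2.2.1 fr.2.2.2.2) := by
  cases aturn with
  | true =>
    simp only [helpA, childrenB, if_true, loopIdx_eq]
    rw [flatMap_single, List.flatMap_map]
    apply flatMap_congr_mem
    intro j hj
    simp
  | false =>
    by_cases hb : bi < b.length
    · simp only [helpA, childrenB, Bool.false_eq_true, if_false, if_pos hb, loopIdx_eq]
      rw [flatMap_single, List.flatMap_map]
      apply flatMap_congr_mem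
      intro j hj
      simp
    · simp [helpA, childrenB, hb]

-- weight of a frame: an upper bound on the number of pops its whole subtree causes
def wS (a b : List Int) (aturn : Bool) (ai bi : Nat) : Nat :=
  (a.length + b.length + 1) ^ (meas a b aturn ai bi + 1)

def procD (a b : List Int) (fr : Bool × List Int × Bool × Nat × Nat) : List (List Int) :=
  (if fr.1 then [fr.2.1] else []) ++
    helpA a b (2*(a.length + b.length) + 2) fr.2.1 fr.2.2.1 fr.2.2.2.1 fr.2.2.2.2

lemma childrenB_length (a b : List Int) (part : List Int) (aturn : Bool) (ai bi : Nat) :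
    (childrenB a b part aturn ai bi).length <= a.length + b.length := by
  cases aturn with
  | true =>
    simp only [childrenB, if_true, loopIdx_eq, flatMap_single]
    simp [List.length_range']
    omega
  | false =>
    by_cases hb : bi < b.length
    · simp only [childrenB, Bool.false_eq_true, if_false, if_pos hb, loopIdx_eq, flatMap_single]
      simp [List.length_range']
      omega
    · simp [childrenB, hb]

lemma childrenB_wsum (a b : List Int) (part : List Int) (aturn : Bool) (ai bi : Nat)
    (hd : DisjR a b) (hinv : StInv a b aturn ai bi) :
    ((childrenB a b part aturn ai bi).map
      (fun fr => wS a b fr.2.2.1 fr.2.2.2.1 fr.2.2.2.2)).sum + 1 <= wS a b aturn ai bi := by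
  set L := a.length + b.length with hL
  set m := meas a b aturn ai bi with hm
  have hone : 1 <= (L + 1) ^ m := Nat.one_le_pow _ _ (by omega)
  have hbound : ((childrenB a b part aturn ai bi).map
      (fun fr => wS a b fr.2.2.1 fr.2.2.2.1 fr.2.2.2.2)).sum <=
      ((childrenB a b part aturn ai bi).map
      (fun fr => wS a b fr.2.2.1 fr.2.2.2.1 fr.2.2.2.2)).length * ((L + 1) ^ m) := by
    apply List.sum_le_card_nsmul
    intro x hx
    simp only [List.mem_map] at hx
    obtain ⟨fr, hfr, rfl⟩ := hx
    have := (children_spec a b part aturn ai bi hd hinv fr hfr).2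
    unfold wS
    exact Nat.pow_le_pow_right (by omega) (by omega)
  have hlen : ((childrenB a b part aturn ai bi).map
      (fun fr => wS a b fr.2.2.1 fr.2.2.2.1 fr.2.2.2.2)).length <= L := by
    rw [List.length_map]
    exact childrenB_length a b part aturn ai bi
  have hstep : wS a b aturn ai bi = (L + 1) ^ m * (L + 1) := by
    unfold wS
    rw [pow_succ]
  rw [hstep]
  nlinarith [hbound, hlen, hone]

lemma runB_eq (a b : List Int) (hd : DisjR a b) :
    forall n frames res,
      (forall fr, fr ∈ frames -> StInv a b fr.2.2.1 fr.2.2.2.1 fr.2.2.2.2) ->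
      (frames.map (fun fr => wS a b fr.2.2.1 fr.2.2.2.1 fr.2.2.2.2)).sum <= n ->
      runB a b n frames res = res ++ frames.flatMap (procD a b) := by
  intro n
  induction n with
  | zero =>
    intro frames res h1 h2
    cases frames with
    | nil => simp [runB]
    | cons fr rest =>
      exfalso
      have : 1 <= wS a b fr.2.2.1 fr.2.2.2.1 fr.2.2.2.2 := Nat.one_le_pow _ _ (by omega)
      simp only [List.map_cons, List.sum_cons] at h2
      omega
  | succ n ih =>
    intro frames res h1 h2
    cases frames with
    | nil => simp [runB]
    | cons fr rest =>
      obtain ⟨emit, part, aturn, ai, bi⟩ := fr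
      have hinv : StInv a b aturn ai bi := h1 (emit, part, aturn, ai, bi) (by simp)
      have hws := childrenB_wsum a b part aturn ai bi hd hinv
      simp only [List.map_cons, List.sum_cons] at h2
      simp only [runB]
      rw [ih (childrenB a b part aturn ai bi ++ rest) _
        (by
          intro fr' hfr'
          rcases List.mem_append.mp hfr' with h | h
          · exact (children_spec a b part aturn ai bi hd hinv fr' h).1
          · exact h1 fr' (List.mem_cons_of_mem _ h))
        (by
          rw [List.map_append, List.sum_append]
          omega)]
      have hproc : procD a b (emit, part, aturn, ai, bi) =
          (if emit then [part] else []) ++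
            (childrenB a b part aturn ai bi).flatMap (procD a b) := by
        unfold procD
        congr 1
        have hD : 2*(a.length + b.length) + 2 = (2*(a.length + b.length) + 1) + 1 := by omega
        rw [hD, helpA_children]
        apply flatMap_congr_mem
        intro fr' hfr'
        obtain ⟨hinv', hmc⟩ := children_spec a b part aturn ai bi hd hinv fr' hfr'
        have hml := meas_le a b aturn ai bi
        congr 1
        exact helpA_stable a b hd (meas a b fr'.2.2.1 fr'.2.2.2.1 fr'.2.2.2.2)
          _ _ _ _ _ _ hinv' le_rfl (by omega) (by omega)
      simp [hproc]

-- ===== VERDICT (by name: the statement is the Claim_ definition above) =====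
theorem f_spec : Claim_equal_f := by
  intro a b _hdom hpre
  have hd : DisjR a b := pre_disjR a b hpre
  have hinv0 : StInv a b true 0 0 := by
    unfold StInv
    simp only [if_true]
    refine ⟨?_, Or.inr (by simp)⟩
    rcases hpre.1 with h | h
    · exact Or.inr h
    · exact Or.inl (by simpa [List.length_pos_iff] using h)
  unfold Spec_f f f_alt
  rw [runB_eq a b hd _ [(false, [], true, 0, 0)] []
    (by intro fr hfr; simp only [List.mem_singleton] at hfr; subst hfr; exact hinv0)
    (by
      simp only [List.map_cons, List.map_nil, List.sum_cons, List.sum_nil, Nat.add_zero]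
      unfold wS
      apply Nat.pow_le_pow_right (by omega)
      have := meas_le a b true 0 0
      omega)]
  simp [procD]
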